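-- pv_equiv track=rewrite | github.com/arcrystal/ChessEngine | src/bitboard_magic.py | set_occupancy
-- ===== SOURCE A (Python) =====
-- def set_occupancy(index, bits, mask):
--     occ = 0
--     bit = 0
--     for i in range(64):
--         if (mask >> i) & 1:
--             if (index >> bit) & 1:
--                 occ |= 1 << i
--             bit += 1
--             if bit >= bits:
--                 break
--     return occ
-- ===== SOURCE B (Python) =====
-- def set_occupancy(index, bits, mask):
--     # Recursive low-bit decomposition: peel bit 0 of the (64-bit-truncated) mask,
--     # build the occupancy back up by shifting, instead of scanning 64 positions
--     # with a consumed-bits counter.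
--     def go(idx, n, m):
--         if n <= 0 or m == 0:
--             return 0
--         if m & 1:
--             return (idx & 1) + (go(idx >> 1, n - 1, m >> 1) << 1)
--         return go(idx, n, m >> 1) << 1
--     return go(index, bits, mask & ((1 << 64) - 1))
-- ===== Notes on version B (the rewrite author's own statement) =====
-- stated objective: alternative
-- what changed: Replaces A's indexed 64-position scan with a mutable consumed-bits counter and early break by a recursive low-bit decomposition: truncate the mask to 64 bits once, then recursively peel bit 0 of the mask (consuming one index bit when it is set) and assemble the occupancy back up by shifting the recursive result left.
-- outside the precondition, e.g. on set_occupancy(1, 0, 1): A returns 1, B returns 0; on set_occupancy(1, -3, 5): A returns 1, B returns 0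
import Mathlib
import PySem

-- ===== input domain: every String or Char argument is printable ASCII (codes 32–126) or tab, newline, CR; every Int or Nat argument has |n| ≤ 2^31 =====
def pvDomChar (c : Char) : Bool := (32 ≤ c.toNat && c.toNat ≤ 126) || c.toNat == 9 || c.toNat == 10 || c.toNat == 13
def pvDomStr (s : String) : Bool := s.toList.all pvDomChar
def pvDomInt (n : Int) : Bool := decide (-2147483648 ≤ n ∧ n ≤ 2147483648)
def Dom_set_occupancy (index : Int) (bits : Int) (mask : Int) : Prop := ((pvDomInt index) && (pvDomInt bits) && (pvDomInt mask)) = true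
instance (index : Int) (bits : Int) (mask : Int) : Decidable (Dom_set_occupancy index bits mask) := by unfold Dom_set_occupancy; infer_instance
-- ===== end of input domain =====

-- B replaces A's indexed 64-position scan with a consumed-bits counter and early break by a
-- recursive low-bit decomposition of the 64-bit-truncated mask (objective: alternative).


-- ===== PORT A =====
-- the 'for i in range(64)' loop with its 'break'; the counters i and bit are always ≥ 0,
-- so they are carried as Nat (Python's shifts by them are the core <<< / >>>)
def pvLoopA (index : Int) (bits : Int) (mask : Int) (i : Nat) (occ : Int) (bit : Nat) : Int :=
  if i < 64 then
    if PySem.Int.band (mask >>> i) 1 != 0 then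
      let occ' := if PySem.Int.band (index >>> bit) 1 != 0 then PySem.Int.bor occ ((1:Int) <<< i) else occ
      if bits ≤ ((bit : Int) + 1) then occ' else pvLoopA index bits mask (i+1) occ' (bit+1)
    else pvLoopA index bits mask (i+1) occ bit
  else occ
termination_by 64 - i

def set_occupancy (index : Int) (bits : Int) (mask : Int) : Int :=
  pvLoopA index bits mask 0 0 0

-- ===== PORT B =====
-- the inner recursive helper 'go'; its mask argument m is always ≥ 0 in Source B
-- (it starts as mask & ((1 << 64) - 1)), so it is carried as Nat
def pvGo (idx : Int) (n : Int) (m : Nat) : Int :=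
  if n ≤ 0 ∨ m = 0 then 0
  else if m &&& 1 = 1 then
    PySem.Int.band idx 1 + ((pvGo (idx >>> (1:Nat)) (n - 1) (m >>> 1)) <<< (1:Nat))
  else (pvGo idx n (m >>> 1)) <<< (1:Nat)
termination_by m
decreasing_by all_goals (simp [Nat.shiftRight_one]; omega)

def set_occupancy_alt (index : Int) (bits : Int) (mask : Int) : Int :=
  pvGo index bits (PySem.Int.band mask ((1:Int) <<< (64:Nat) - 1)).toNat

-- ===== PRECONDITION & SPEC =====
-- Pre_ excludes only inputs with a non-positive bit count AND an odd index AND a set bit in the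
-- low 64 bits of the mask: there A's post-increment break still consumes the first set mask bit
-- (returning 1 shifted to its position), a quirk of the fused loop outside the natural domain of
-- a bit-count parameter; everywhere else A = B is proved.
def Pre_set_occupancy (index : Int) (bits : Int) (mask : Int) : Prop :=
  1 ≤ bits ∨ PySem.Int.band index 1 = 0 ∨ ∀ j : Nat, j < 64 → PySem.Int.band (mask >>> j) 1 = 0
instance (index : Int) (bits : Int) (mask : Int) : Decidable (Pre_set_occupancy index bits mask) := by unfold Pre_set_occupancy; infer_instance
def pvWitness_set_occupancy : Int × Int × Int := (5, 3, 22)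

def Spec_set_occupancy (index : Int) (bits : Int) (mask : Int) (out : Int) : Prop := out = set_occupancy_alt index bits mask
instance (index : Int) (bits : Int) (mask : Int) (out : Int) : Decidable (Spec_set_occupancy index bits mask out) := by unfold Spec_set_occupancy; infer_instance

-- ===== CLAIM (what is proved, stated in full; the proofs are below) =====
def Claim_equal_set_occupancy : Prop := ∀ (index : Int) (bits : Int) (mask : Int), Dom_set_occupancy index bits mask → Pre_set_occupancy index bits mask → Spec_set_occupancy index bits mask (set_occupancy index bits mask)

-- ===== LEMMAS AND PROOFS =====

-- disjoint OR is addition: a ||| 2^i = a + 2^i when a < 2^i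
theorem pvLorPow (a i : Nat) (h : a < 2^i) : a ||| 2^i = a + 2^i := by
  apply Nat.eq_of_testBit_eq
  intro k
  rw [Nat.testBit_lor, Nat.testBit_two_pow,
      Nat.testBit_eq_decide_div_mod_eq, Nat.testBit_eq_decide_div_mod_eq]
  rcases lt_trichotomy k i with hk | rfl | hk
  · have hsplit : (2:Nat)^i = 2^k * (2 * 2^(i-k-1)) := by
      rw [← pow_succ', ← pow_add]
      congr 1
      omega
    have hdiv : (a + 2^i) / 2^k = a / 2^k + 2 * 2^(i-k-1) := by
      rw [hsplit, Nat.add_mul_div_left _ _ (Nat.two_pow_pos k)]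
    rw [hdiv]
    have : decide (i = k) = false := by simp; omega
    rw [this]
    simp only [Bool.or_false]
    rw [Nat.add_mul_mod_self_left]
  · have hdiv : (a + 2^k) / 2^k = 1 := by
      rw [Nat.add_div_right _ (Nat.two_pow_pos k), Nat.div_eq_of_lt h]
    rw [hdiv, Nat.div_eq_of_lt h]
    simp
  · have hik : (2:Nat)^(i+1) ≤ 2^k := Nat.pow_le_pow_right (by norm_num) (by omega)
    have h1 : (a + 2^i) / 2^k = 0 := by
      apply Nat.div_eq_of_lt
      have : a + 2^i < 2^(i+1) := by rw [pow_succ]; omega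
      omega
    have h2 : a / 2^k = 0 := by
      apply Nat.div_eq_of_lt
      have : (2:Nat)^i ≤ 2^k := Nat.pow_le_pow_right (by norm_num) (by omega)
      omega
    rw [h1, h2]
    simp
    omega

-- Int version, matching port A's 'occ |= 1 << i'
theorem pvBorPow (occ : Int) (i : Nat) (h0 : 0 ≤ occ) (h1 : occ < 2^i) :
    PySem.Int.bor occ ((1:Int) <<< i) = occ + 2^i := by
  have hsh : ((1:Int) <<< i) = ((2^i : Nat) : Int) := by
    rw [Int.shiftLeft_eq]; push_cast; ring
  rw [hsh, PySem.Int.bor_of_nonneg h0 (by positivity), Int.toNat_natCast]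
  have h2 : occ < ((2^i : Nat) : Int) := by push_cast; exact h1
  have hlt : occ.toNat < 2^i := by omega
  rw [pvLorPow _ _ hlt]
  push_cast
  omega

-- Python's mask & ((1 << 64) - 1) is mask mod 2^64
theorem pvBandLow (mask : Int) :
    PySem.Int.band mask ((1:Int) <<< (64:Nat) - 1) = mask % (2^64 : Int) := by
  have hlit : ((1:Int) <<< (64:Nat) - 1) = ((2^64 - 1 : Nat) : Int) := by
    rw [Int.shiftLeft_eq]; norm_num
  rw [hlit]
  simp only [PySem.Int.band]
  have hpow : ((2:Int)^64) = 18446744073709551616 := by norm_num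
  have hpn : ((2:Nat)^64) = 18446744073709551616 := by norm_num
  by_cases hm : 0 ≤ mask
  · rw [if_pos hm, if_pos (by positivity)]
    have ht : ((2^64 - 1 : Nat) : Int).toNat = 2^64 - 1 := by omega
    rw [ht, Nat.and_two_pow_sub_one_eq_mod]
    omega
  · rw [if_neg hm, if_pos (by positivity)]
    have ht : ((2^64 - 1 : Nat) : Int).toNat = 2^64 - 1 := by omega
    rw [ht, Nat.and_comm, Nat.and_two_pow_sub_one_eq_mod]
    omega

-- (index >> bit) & 1 is a bit
theorem pvBandOneBound (idx : Int) :
    0 ≤ PySem.Int.band idx 1 ∧ PySem.Int.band idx 1 < 2 := by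
  rw [PySem.Int.band_one]
  exact ⟨PySem.Int.mod_nonneg idx (by norm_num), PySem.Int.mod_lt idx (by norm_num)⟩

-- bit i of the truncated mask agrees with A's test (mask >> i) & 1, for i < 64
theorem pvBitAgree (mask : Int) (i : Nat) (hi : i < 64) :
    ((mask % (2^64 : Int)).toNat >>> i) &&& 1 = (PySem.Int.band (mask >>> i) 1).toNat ∧
      (0 ≤ PySem.Int.band (mask >>> i) 1 ∧ PySem.Int.band (mask >>> i) 1 < 2) := by
  refine ⟨?_, pvBandOneBound _⟩
  rw [PySem.Int.band_one, PySem.Int.mod_eq_emod_of_pos (by norm_num)]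
  rw [Nat.and_one_is_mod, Nat.shiftRight_eq_div_pow, Int.shiftRight_eq_div_pow]
  -- split mask into its quotient and remainder modulo 2^64
  have hsplit : mask = mask % (2^64 : Int) + 2^i * (2 * 2^(63-i) * (mask / 2^64)) := by
    have h64 : (2:Int)^64 = 2^i * (2 * 2^(63-i)) := by
      rw [← pow_succ', ← pow_add]
      congr 1
      omega
    have h := Int.mul_ediv_add_emod mask (2^64)
    linear_combination -h + (mask / (2^64:Int)) * h64
  have hr0 : 0 ≤ mask % (2^64 : Int) := Int.emod_nonneg mask (by positivity)
  have hdiv : mask / ((2^i : Nat) : Int) = mask % (2^64 : Int) / 2^i + 2 * 2^(63-i) * (mask / 2^64) := by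
    have hc : ((2^i : Nat) : Int) = (2:Int)^i := by push_cast; ring
    rw [hc]
    conv_lhs => rw [hsplit]
    exact Int.add_mul_ediv_left _ _ (by positivity)
  rw [hdiv]
  have hmod : (mask % (2^64 : Int) / 2^i + 2 * 2^(63-i) * (mask / 2^64)) % 2
      = mask % (2^64 : Int) / 2^i % 2 := by
    have h2 : (2:Int) * 2^(63-i) * (mask / 2^64) = 2 * (2^(63-i) * (mask / 2^64)) := by ring
    rw [h2]
    omega
  rw [hmod]
  -- move to Nat on the remainder
  have hrn : mask % (2^64 : Int) = (((mask % (2^64 : Int)).toNat : Nat) : Int) := by omega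
  have hfin : mask % (2^64:Int) / (2:Int)^i % 2
      = (((mask % (2^64:Int)).toNat / 2^i % 2 : Nat) : Int) := by
    rw [show ((2:Int)^i) = ((2^i : Nat) : Int) by push_cast; ring]
    conv_lhs => rw [hrn]
    rw [← Int.natCast_div]
    norm_cast
  rw [hfin, Int.toNat_natCast]


-- pvGo on an even mask argument halves it
theorem pvGo_even (idx n : Int) (m : Nat) (hm : m % 2 = 0) :
    pvGo idx n m = 2 * pvGo idx n (m >>> 1) := by
  rw [pvGo]
  by_cases h : n ≤ 0 ∨ m = 0
  · rw [if_pos h, pvGo]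
    rcases h with h | h
    · rw [if_pos (Or.inl h)]; ring
    · rw [if_pos (Or.inr (by simp [h, Nat.shiftRight_one]))]; ring
  · rw [if_neg h, if_neg (by rw [Nat.and_one_is_mod]; omega)]
    rw [Int.shiftLeft_eq]; ring

-- pvGo results are nonnegative
theorem pvGo_nonneg (idx n : Int) (m : Nat) : 0 ≤ pvGo idx n m := by
  rw [pvGo]
  split_ifs with h1 h2
  · exact le_rfl
  · have hr := pvGo_nonneg (idx >>> (1:Nat)) (n - 1) (m >>> 1)
    have hc := pvBandOneBound idx
    rw [Int.shiftLeft_eq]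
    nlinarith
  · have hr := pvGo_nonneg idx n (m >>> 1)
    rw [Int.shiftLeft_eq]
    nlinarith
termination_by m
decreasing_by all_goals (simp [Nat.shiftRight_one]; omega)

-- main invariant: the remainder of A's scan equals B's recursion on the remaining mask bits
theorem pvMain (index bits mask : Int) (i bit : Nat) (occ : Int)
    (hb : (bit : Int) < bits) (ho : 0 ≤ occ) (hlt : occ < 2^i) :
    pvLoopA index bits mask i occ bit
      = occ + (pvGo (index >>> bit) (bits - bit) ((mask % (2^64 : Int)).toNat >>> i)) * 2^i := by
  rw [pvLoopA]
  by_cases hi : i < 64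
  case neg =>
    rw [if_neg hi]
    have hM : (mask % (2^64 : Int)).toNat >>> i = 0 := by
      rw [Nat.shiftRight_eq_div_pow]
      apply Nat.div_eq_of_lt
      have h1 : mask % (2^64:Int) < 2^64 := Int.emod_lt_of_pos mask (by positivity)
      have h2 : (2:Nat)^64 ≤ 2^i := Nat.pow_le_pow_right (by norm_num) (by omega)
      have h3 : ((2:Int)^64) = ((2^64 : Nat) : Int) := by norm_num
      omega
    rw [hM, pvGo, if_pos (Or.inr rfl)]
    ring
  case pos =>
    rw [if_pos hi]
    obtain ⟨hbitEq, hb0, hb2⟩ := pvBitAgree mask i hi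
    have hshift : (mask % (2^64 : Int)).toNat >>> (i+1) = ((mask % (2^64 : Int)).toNat >>> i) >>> 1 :=
      Nat.shiftRight_add _ i 1
    have hpow : (2:Int)^(i+1) = 2 * 2^i := by ring
    by_cases hset : (PySem.Int.band (mask >>> i) 1 != 0) = true
    · rw [if_pos hset]
      have ha1 : PySem.Int.band (mask >>> i) 1 = 1 := by
        simp only [bne_iff_ne, ne_eq] at hset; omega
      have htodd : ((mask % (2^64 : Int)).toNat >>> i) &&& 1 = 1 := by rw [hbitEq, ha1]; rfl
      have htne : (mask % (2^64 : Int)).toNat >>> i ≠ 0 := by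
        intro h0; rw [h0] at htodd; simp at htodd
      have hgo : pvGo (index >>> bit) (bits - bit) ((mask % (2^64 : Int)).toNat >>> i)
          = PySem.Int.band (index >>> bit) 1
            + ((pvGo ((index >>> bit) >>> (1:Nat)) (bits - (bit:Int) - 1) (((mask % (2^64 : Int)).toNat >>> i) >>> 1)) <<< (1:Nat)) := by
        rw [pvGo, if_neg (by simp only [not_or]; exact ⟨by omega, htne⟩), if_pos htodd]
      obtain ⟨hc0, hc2⟩ := pvBandOneBound (index >>> bit)
      have hidx : (index >>> bit) >>> (1:Nat) = index >>> (bit+1) :=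
        (Int.shiftRight_add index bit 1).symm
      have hocc' : (if (PySem.Int.band (index >>> bit) 1 != 0) = true
              then PySem.Int.bor occ ((1:Int) <<< i) else occ)
          = occ + PySem.Int.band (index >>> bit) 1 * 2^i := by
        by_cases hc : (PySem.Int.band (index >>> bit) 1 != 0) = true
        · rw [if_pos hc, pvBorPow occ i ho hlt]
          have h1 : PySem.Int.band (index >>> bit) 1 = 1 := by
            simp only [bne_iff_ne, ne_eq] at hc; omega
          rw [h1]; ring
        · rw [if_neg hc]
          have h1 : PySem.Int.band (index >>> bit) 1 = 0 := by
            simp only [bne_iff_ne, ne_eq, not_not] at hc; exact hc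
          rw [h1]; ring
      by_cases hlast : bits ≤ (bit:Int) + 1
      · rw [if_pos hlast]
        have hinner : pvGo ((index >>> bit) >>> (1:Nat)) (bits - (bit:Int) - 1)
            (((mask % (2^64 : Int)).toNat >>> i) >>> 1) = 0 := by
          rw [pvGo, if_pos (Or.inl (by omega))]
        rw [hocc', hgo, hinner]
        rw [Int.shiftLeft_eq]
        ring
      · rw [if_neg hlast]
        have hno : 0 ≤ occ + PySem.Int.band (index >>> bit) 1 * 2^i := by
          have : 0 ≤ PySem.Int.band (index >>> bit) 1 * 2^i :=
            mul_nonneg hc0 (by positivity)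
          linarith
        have hnl : occ + PySem.Int.band (index >>> bit) 1 * 2^i < 2^(i+1) := by
          have h1 : PySem.Int.band (index >>> bit) 1 * 2^i ≤ 1 * 2^i :=
            mul_le_mul_of_nonneg_right (by omega) (by positivity)
          rw [hpow]; linarith
        have hIH := pvMain index bits mask (i+1) (bit+1)
            (occ + PySem.Int.band (index >>> bit) 1 * 2^i)
            (by push_cast; omega) hno hnl
        rw [hocc', hIH, hgo, hidx, hshift]
        have hcast : bits - ((bit+1 : Nat) : Int) = bits - (bit:Int) - 1 := by push_cast; ring
        rw [hcast, Int.shiftLeft_eq, hpow]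
        ring
    · rw [if_neg hset]
      have ha0 : PySem.Int.band (mask >>> i) 1 = 0 := by
        simp only [bne_iff_ne, ne_eq, not_not] at hset; exact hset
      have hteven : ((mask % (2^64 : Int)).toNat >>> i) % 2 = 0 := by
        rw [← Nat.and_one_is_mod, hbitEq, ha0]; rfl
      rw [pvGo_even _ _ _ hteven, ← hshift]
      have hlt' : occ < 2^(i+1) := by rw [hpow]; nlinarith [pow_pos (show (0:Int) < 2 by norm_num) i]
      rw [pvMain index bits mask (i+1) bit occ hb ho hlt', hpow]
      ring
termination_by 64 - i

theorem pvLoopA_even (index bits mask : Int) (hi2 : PySem.Int.band index 1 = 0) (hb : bits ≤ 0) (i : Nat) :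
    pvLoopA index bits mask i 0 0 = 0 := by
  rw [pvLoopA]
  by_cases hi : i < 64
  · rw [if_pos hi]
    by_cases hp : PySem.Int.band (mask >>> i) 1 != 0
    · have h0 : (index >>> (0:Nat)) = index := by
        rw [Int.shiftRight_eq_div_pow]; norm_num
      simp only [if_pos hp, h0, hi2]
      norm_num
      intro hb'
      omega
    · rw [if_neg hp]
      exact pvLoopA_even index bits mask hi2 hb (i + 1)
  · rw [if_neg hi]
termination_by 64 - i

theorem pvLoopA_zmask (index bits mask : Int)
    (h : ∀ j : Nat, j < 64 → PySem.Int.band (mask >>> j) 1 = 0) (i : Nat) (occ : Int) (bit : Nat) :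
    pvLoopA index bits mask i occ bit = occ := by
  rw [pvLoopA]
  by_cases hi : i < 64
  · rw [if_pos hi, if_neg (by simp [h i hi]), pvLoopA_zmask index bits mask h (i + 1)]
  · rw [if_neg hi]
termination_by 64 - i

-- ===== VERDICT (by name: the statement is the Claim_ definition above) =====
theorem set_occupancy_spec : Claim_equal_set_occupancy := by
  intro index bits mask _ hpre
  unfold Spec_set_occupancy set_occupancy set_occupancy_alt
  rw [pvBandLow]
  by_cases hbits : 1 ≤ bits
  · have := pvMain index bits mask 0 0 0 (by exact_mod_cast hbits) le_rfl (by norm_num)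
    simpa using this
  · rw [pvGo, if_pos (Or.inl (by omega))]
    rcases hpre with h | h | h
    · omega
    · exact pvLoopA_even index bits mask h (by omega) 0
    · exact pvLoopA_zmask index bits mask h 0 0 0
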